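-- pv_equiv track=rewrite | github.com/shijiasheng/DataWareHouseTotal | Code/DataProcess/CleanData/AboutMovie/final_clean.py | clean_title_as_movie2
-- ===== SOURCE A (Python) =====
-- def clean_title_as_movie2(s):
--     s_new = ''
--     # 去除[]
--     for i in s:
--         if i == '[':
--             break
--         s_new = s_new + i
--
--     s = s_new
--     s_new = ''
--     for i in s:
--         if i == '(':
--             break
--         s_new = s_new + i
--
--     # 去除特定的
--     delete = ['(IMAX)', '(DVD)', '(Home Use)', '(BD)', '(English Subtitled)', '(Full Screen Edition)', '(D-VHS)',
--               'United', '[VHS]'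
--         , '[Region 2]', 'DVD']
--     for d in delete:
--         s_new = s_new.replace(d, '')
--     # &变成and
--     s_new = s_new.replace('&', 'and')
--     return s_new
-- ===== SOURCE B (Python) =====
-- def clean_title_as_movie2(s):
--     # one pass: cut at the earliest '[' or '(' (A does two sequential truncations)
--     head = s
--     for i, c in enumerate(s):
--         if c in '[(':
--             head = s[:i]
--             break
--     for d in ('(IMAX)', '(DVD)', '(Home Use)', '(BD)', '(English Subtitled)',
--               '(Full Screen Edition)', '(D-VHS)', 'United', '[VHS]',
--               '[Region 2]', 'DVD'):
--         head = head.replace(d, '')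
--     return head.replace('&', 'and')
-- ===== Notes on version B (the rewrite author's own statement) =====
-- stated objective: simpler
-- what changed: A truncates twice, rebuilding the string character by character first at the opening square bracket and then at the opening parenthesis; B makes one pass to find the earliest of those two bracket characters and cuts once with a slice, then applies the same fixed phrase deletions and ampersand replacement.
import Mathlib
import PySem

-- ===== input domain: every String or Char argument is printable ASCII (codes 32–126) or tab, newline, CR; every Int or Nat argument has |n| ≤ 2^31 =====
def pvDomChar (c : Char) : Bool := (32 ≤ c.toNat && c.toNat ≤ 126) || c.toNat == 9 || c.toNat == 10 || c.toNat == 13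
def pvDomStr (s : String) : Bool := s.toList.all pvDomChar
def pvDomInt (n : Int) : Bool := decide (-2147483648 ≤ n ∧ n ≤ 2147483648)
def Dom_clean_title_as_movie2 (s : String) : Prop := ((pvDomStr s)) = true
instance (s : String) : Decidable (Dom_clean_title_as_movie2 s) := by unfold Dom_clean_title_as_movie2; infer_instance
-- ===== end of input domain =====

-- B replaces A's two sequential char-by-char truncation loops by one cut at the
-- earliest '[' or '(' found in a single pass (objective: simpler); the fixed
-- deletions and the '&' replacement are unchanged.

-- the literal delete-list both Pythons share (pure data)
def pvDeletePhrases : List String :=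
  ["(IMAX)", "(DVD)", "(Home Use)", "(BD)", "(English Subtitled)",
   "(Full Screen Edition)", "(D-VHS)", "United", "[VHS]", "[Region 2]", "DVD"]

-- ===== PORT A =====
-- 'for i in s: if i == brk: break; s_new = s_new + i'
def pvTruncA (brk : Char) : List Char → List Char → List Char
  | [], acc => acc
  | c :: cs, acc => if c = brk then acc else pvTruncA brk cs (acc ++ [c])

def clean_title_as_movie2 (s : String) : String :=
  let s1 := pvTruncA '[' s.toList []
  let s2 := pvTruncA '(' s1 []
  let s3 := pvDeletePhrases.foldl (fun acc d => PySem.Str.replace acc d "") (String.ofList s2)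
  PySem.Str.replace s3 "&" "and"

-- ===== PORT B =====
-- 'for i, c in enumerate(s): if c in '[(': head = s[:i]; break'
def pvFindCut : List Char → Nat → Option Nat
  | [], _ => none
  | c :: cs, i => if c = '[' ∨ c = '(' then some i else pvFindCut cs (i + 1)

def clean_title_as_movie2_alt (s : String) : String :=
  let head :=
    match pvFindCut s.toList 0 with
    | none => s
    | some i => PySem.Str.slice s none (some (i : Int))
  let head2 := pvDeletePhrases.foldl (fun acc d => PySem.Str.replace acc d "") head
  PySem.Str.replace head2 "&" "and"

-- ===== PRECONDITION & SPEC =====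
def Spec_clean_title_as_movie2 (s : String) (out : String) : Prop := out = clean_title_as_movie2_alt s
instance (s : String) (out : String) : Decidable (Spec_clean_title_as_movie2 s out) := by unfold Spec_clean_title_as_movie2; infer_instance

-- ===== CLAIM (what is proved, stated in full; the proofs are below) =====
def Claim_equal_clean_title_as_movie2 : Prop := ∀ (s : String), Dom_clean_title_as_movie2 s → Spec_clean_title_as_movie2 s (clean_title_as_movie2 s)

-- ===== LEMMAS AND PROOFS =====

theorem pvTruncA_eq_takeWhile (brk : Char) (l acc : List Char) :
    pvTruncA brk l acc = acc ++ l.takeWhile (· ≠ brk) := by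
  induction l generalizing acc with
  | nil => simp [pvTruncA]
  | cons c cs ih =>
    by_cases h : c = brk <;> simp [pvTruncA, h, ih]

theorem pvFindCut_ge (l : List Char) (n i : Nat) (h : pvFindCut l n = some i) : n ≤ i := by
  induction l generalizing n with
  | nil => simp [pvFindCut] at h
  | cons c cs ih =>
    simp only [pvFindCut] at h
    split at h
    · simp_all
    · have := ih (n + 1) h; omega

theorem takeWhile_takeWhile_eq_cut (l : List Char) (n : Nat) :
    (l.takeWhile (· ≠ '[')).takeWhile (· ≠ '(') =
      (match pvFindCut l n with
       | none => l
       | some i => l.take (i - n)) := by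
  induction l generalizing n with
  | nil => simp [pvFindCut]
  | cons c cs ih =>
    by_cases hb : c = '[' ∨ c = '('
    · rcases hb with hb | hb <;>
        simp [pvFindCut, hb]
    · push Not at hb
      obtain ⟨h1, h2⟩ := hb
      simp only [pvFindCut, List.takeWhile_cons, h1, h2, or_self, if_false,
        ne_eq, not_false_eq_true, decide_true, if_true]
      rw [ih (n + 1)]
      cases hfc : pvFindCut cs (n + 1) with
      | none => simp
      | some i =>
        have := pvFindCut_ge cs (n + 1) i hfc
        have hin : i - n = (i - (n + 1)) + 1 := by omega
        simp [hin]

theorem clean_title_as_movie2_spec' (s : String) :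
    clean_title_as_movie2 s = clean_title_as_movie2_alt s := by
  unfold clean_title_as_movie2 clean_title_as_movie2_alt
  simp only [pvTruncA_eq_takeWhile, List.nil_append]
  rw [takeWhile_takeWhile_eq_cut s.toList 0]
  cases hfc : pvFindCut s.toList 0 with
  | none => simp
  | some i =>
    have hs : PySem.Str.slice s none (some (i : Int)) = String.ofList (s.toList.take i) := by
      have h1 : (PySem.Str.slice s none (some (i : Int))).toList = s.toList.take i := by
        simp [PySem.List.slice_to_natCast]
      have h2 := congrArg String.ofList h1
      rwa [String.ofList_toList] at h2
    simp [hs]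

-- ===== VERDICT (by name: the statement is the Claim_ definition above) =====
theorem clean_title_as_movie2_spec : Claim_equal_clean_title_as_movie2 := by
  intro s _
  exact clean_title_as_movie2_spec' s
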